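-- pv_equiv track=rewrite | github.com/wm389751584x/leetcodeformeng | compareProduct_1.py | compareProduct
-- ===== SOURCE A (Python) =====
-- def compareProduct(num: int):
--     if num < 10:
--         return False
--     oddProdValue, evenProdValue = 0, 0
--     while num > 0:
--         digit = num % 10
--         oddProdValue += digit
--         num = num // 10
--         if num == 0:
--             break
--         digit = num % 10
--         evenProdValue += digit
--         num = num // 10
--
--     if oddProdValue == evenProdValue:
--         return True
--     return False
-- ===== SOURCE B (Python) =====
-- def compareProduct(num: int):
--     if num < 10:
--         return False
--     r = str(num)[::-1]
--     oddSum = sum(int(c) for i, c in enumerate(r) if i % 2 == 0)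
--     evenSum = sum(int(c) for i, c in enumerate(r) if i % 2 == 1)
--     return oddSum == evenSum
-- ===== Notes on version B (the rewrite author's own statement) =====
-- stated objective: simpler
-- what changed: Replaces the two-accumulator modulo/division peeling loop (two digits per iteration with a break) by converting the number to its decimal string once, reversing it, and comparing the sums of the digits at even and at odd positions of the reversed string.
import Mathlib
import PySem

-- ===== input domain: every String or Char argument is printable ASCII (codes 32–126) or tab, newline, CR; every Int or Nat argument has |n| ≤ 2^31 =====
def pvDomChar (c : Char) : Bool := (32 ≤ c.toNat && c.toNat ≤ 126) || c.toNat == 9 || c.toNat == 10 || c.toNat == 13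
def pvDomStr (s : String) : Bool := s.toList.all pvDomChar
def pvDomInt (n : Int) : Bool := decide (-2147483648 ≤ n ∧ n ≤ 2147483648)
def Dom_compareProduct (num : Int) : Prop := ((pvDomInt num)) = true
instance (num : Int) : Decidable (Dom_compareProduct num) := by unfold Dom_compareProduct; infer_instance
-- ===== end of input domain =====

-- B replaces A's two-accumulator modulo/division peeling loop by converting the number to its
-- decimal string once, reversing it, and comparing the digit sums at even and odd positions
-- (objective: simpler).

-- ===== PORT A =====
-- the while loop of A: state (num, oddProdValue, evenProdValue); peels up to two digits per iteration
def compareProductLoop (num oddP evenP : Int) : Int × Int :=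
  if h : 0 < num then
    let digit := PySem.Int.mod num 10
    let oddP' := oddP + digit
    let num1 := PySem.Int.floordiv num 10
    if h0 : num1 = 0 then (oddP', evenP)
    else
      compareProductLoop (PySem.Int.floordiv num1 10) oddP' (evenP + PySem.Int.mod num1 10)
  else (oddP, evenP)
  termination_by num.toNat
  decreasing_by
    have h10 : PySem.Int.floordiv num 10 = num / 10 := PySem.Int.floordiv_eq_ediv_of_pos (by omega)
    have h20 : PySem.Int.floordiv (num / 10) 10 = num / 10 / 10 :=
      PySem.Int.floordiv_eq_ediv_of_pos (by omega)
    simp only [h10] at h0 ⊢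
    simp only [h20]
    omega

def compareProduct (num : Int) : Bool :=
  if num < 10 then false
  else
    let p := compareProductLoop num 0 0
    if p.1 = p.2 then true else false

-- ===== PORT B =====
-- int(c) for a single character; exact on the decimal digit characters '0'..'9'
-- (the only characters str(num)[::-1] contains here, since num ≥ 10)
def pvDigitInt (c : Char) : Int := (c.toNat : Int) - 48

def compareProduct_alt (num : Int) : Bool :=
  if num < 10 then false
  else
    let r := (PySem.List.slice? (PySem.Int.toChars num) none none (-1)).getD []  -- str(num)[::-1]
    let oddSum := (((PySem.List.enumerate r 0).filter
        (fun p => PySem.Int.mod p.1 2 == 0)).map (fun p => pvDigitInt p.2)).sum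
    let evenSum := (((PySem.List.enumerate r 0).filter
        (fun p => PySem.Int.mod p.1 2 == 1)).map (fun p => pvDigitInt p.2)).sum
    oddSum == evenSum

-- ===== PRECONDITION & SPEC =====
def Spec_compareProduct (num : Int) (out : Bool) : Prop := out = compareProduct_alt num
instance (num : Int) (out : Bool) : Decidable (Spec_compareProduct num out) := by unfold Spec_compareProduct; infer_instance

-- ===== CLAIM (what is proved, stated in full; the proofs are below) =====
def Claim_equal_compareProduct : Prop := ∀ (num : Int), Dom_compareProduct num → Spec_compareProduct num (compareProduct num)

-- ===== LEMMAS AND PROOFS =====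

-- sum of the entries at even (pvSumE) resp. odd (pvSumO) indices of a list
mutual
def pvSumE : List Int → Int
  | [] => 0
  | d :: t => d + pvSumO t
def pvSumO : List Int → Int
  | [] => 0
  | _ :: t => pvSumE t
end

-- Nat.toDigitsCore produces the base-10 digits (most significant first), given enough fuel
theorem pv_core_eq (f : Nat) : ∀ (m : Nat) (acc : List Char), 0 < m → m < 10 ^ f →
    Nat.toDigitsCore 10 f m acc = ((Nat.digits 10 m).map Nat.digitChar).reverse ++ acc := by
  induction f with
  | zero => intro m acc h1 h2; omega
  | succ f ih =>
    intro m acc h1 h2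
    rw [Nat.toDigitsCore]
    by_cases h0 : m / 10 = 0
    · have hlt : m < 10 := by omega
      rw [Nat.digits_def' (by norm_num) h1]
      simp [h0, Nat.mod_eq_of_lt hlt]
    · have hdiv : m / 10 < 10 ^ f := by
        have : m < 10 * 10 ^ f := by rw [← pow_succ']; exact h2
        omega
      simp only [h0, if_false]
      rw [ih (m / 10) _ (by omega) hdiv, Nat.digits_def' (by norm_num) h1]
      simp

theorem pv_toChars_rev (m : Nat) (hm : 0 < m) :
    (PySem.Int.toChars (m : Int)).reverse = (Nat.digits 10 m).map Nat.digitChar := by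
  have h1 : PySem.Int.toChars (m : Int) = Nat.toDigits 10 m := by
    simp [PySem.Int.toChars, not_lt.mpr (Int.natCast_nonneg m)]
  have h2 : m < 10 ^ (m + 1) :=
    lt_of_lt_of_le (Nat.lt_pow_self (by norm_num)) (Nat.pow_le_pow_right (by norm_num) (by omega))
  rw [h1, Nat.toDigits, pv_core_eq (m + 1) m [] hm h2]
  simp

-- the value of int(c) on a digit character
theorem pv_digitInt_digitChar (d : Nat) (hd : d < 10) :
    pvDigitInt (Nat.digitChar d) = (d : Int) := by
  interval_cases d <;> decide

-- B's two filtered enumerate-sums are the even/odd-position sums (swapped when the start index is odd)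
theorem pv_enum_sum (cs : List Char) : ∀ k : Nat,
    ((((PySem.List.enumerate cs (k : Int)).filter
        (fun p => PySem.Int.mod p.1 2 == 0)).map (fun p => pvDigitInt p.2)).sum,
     (((PySem.List.enumerate cs (k : Int)).filter
        (fun p => PySem.Int.mod p.1 2 == 1)).map (fun p => pvDigitInt p.2)).sum)
      = if k % 2 = 0 then (pvSumE (cs.map pvDigitInt), pvSumO (cs.map pvDigitInt))
        else (pvSumO (cs.map pvDigitInt), pvSumE (cs.map pvDigitInt)) := by
  induction cs with
  | nil => intro k; simp [PySem.List.enumerate, pvSumE, pvSumO]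
  | cons c t ih =>
    intro k
    have hmod : PySem.Int.mod (k : Int) 2 = ((k % 2 : Nat) : Int) := by
      exact_mod_cast PySem.Int.mod_natCast k 2
    have hcast : ((k : Int) + 1) = ((k + 1 : Nat) : Int) := by push_cast; ring
    have ht := ih (k + 1)
    rw [PySem.List.enumerate_cons, hcast]
    by_cases hk : k % 2 = 0
    · have hk1 : (k + 1) % 2 = 1 := by omega
      rw [hk1] at ht
      have e0 : ((k : Int) % 2) = 0 := by omega
      simp only [hk, if_pos] at ht ⊢
      simp [List.filter, e0, Prod.ext_iff, pvSumE, pvSumO] at ht ⊢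
      exact ⟨ht.1, ht.2⟩
    · have hk1 : (k + 1) % 2 = 0 := by omega
      rw [hk1] at ht
      have e1 : ((k : Int) % 2) = 1 := by omega
      simp only [if_pos] at ht
      simp only [hk, if_false]
      simp [List.filter, e1, Prod.ext_iff, pvSumE, pvSumO] at ht ⊢
      exact ⟨ht.1, ht.2⟩

-- A's loop adds the even/odd-position digit sums to its two accumulators
theorem pv_loop_eq (m : Nat) : ∀ o e : Int,
    compareProductLoop (m : Int) o e =
      (o + pvSumE (List.map (fun d : Nat => (d : Int)) (Nat.digits 10 m)),
       e + pvSumO (List.map (fun d : Nat => (d : Int)) (Nat.digits 10 m))) := by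
  induction m using Nat.strong_induction_on with
  | _ m ih =>
    intro o e
    rw [compareProductLoop]
    by_cases hm : 0 < m
    · rw [dif_pos (by exact_mod_cast hm)]
      have hmod : PySem.Int.mod (m : Int) 10 = ((m % 10 : Nat) : Int) := by
        exact_mod_cast PySem.Int.mod_natCast m 10
      have hdiv : PySem.Int.floordiv (m : Int) 10 = ((m / 10 : Nat) : Int) := by
        exact_mod_cast PySem.Int.floordiv_natCast m 10
      rw [Nat.digits_def' (by norm_num : (1:Nat) < 10) hm]
      by_cases h0 : m / 10 = 0
      · rw [dif_pos (by rw [hdiv, h0]; rfl)]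
        simp [h0, pvSumE, pvSumO]
      · rw [dif_neg (by rw [hdiv]; exact_mod_cast h0)]
        have hmod2 : PySem.Int.mod ((m / 10 : Nat) : Int) 10 = ((m / 10 % 10 : Nat) : Int) := by
          exact_mod_cast PySem.Int.mod_natCast (m / 10) 10
        have hdiv2 : PySem.Int.floordiv ((m / 10 : Nat) : Int) 10 = ((m / 10 / 10 : Nat) : Int) := by
          exact_mod_cast PySem.Int.floordiv_natCast (m / 10) 10
        rw [hdiv, hdiv2, hmod, hmod2, ih (m / 10 / 10) (by omega)]
        rw [Nat.digits_def' (n := m / 10) (by norm_num : (1:Nat) < 10) (Nat.pos_of_ne_zero h0)]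
        simp [pvSumE, pvSumO]
        constructor <;> ring
    · have hm0 : m = 0 := by omega
      subst hm0
      rw [dif_neg (by norm_num)]
      simp [pvSumE, pvSumO]

-- ===== VERDICT (by name: the statement is the Claim_ definition above) =====
theorem compareProduct_spec : Claim_equal_compareProduct := by
  intro num _
  unfold Spec_compareProduct compareProduct compareProduct_alt
  by_cases hlt : num < 10
  · simp [hlt]
  · simp only [hlt, if_false]
    obtain ⟨m, rfl⟩ : ∃ m : Nat, num = (m : Int) := ⟨num.toNat, by omega⟩
    have hm : 0 < m := by omega
    rw [pv_loop_eq m 0 0, PySem.List.slice?_none_none_neg_one]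
    simp only [Option.getD_some]
    rw [pv_toChars_rev m hm]
    have hmap : ((Nat.digits 10 m).map Nat.digitChar).map pvDigitInt
        = List.map (fun d : Nat => (d : Int)) (Nat.digits 10 m) := by
      rw [List.map_map]
      refine List.map_congr_left fun d hd => ?_
      exact pv_digitInt_digitChar d (Nat.digits_lt_base (by norm_num) hd)
    have he := pv_enum_sum ((Nat.digits 10 m).map Nat.digitChar) 0
    rw [if_pos (by norm_num), Prod.ext_iff] at he
    simp only [Nat.cast_zero] at he
    rw [he.1, he.2, hmap]
    by_cases heq : pvSumE (List.map (fun d : Nat => (d : Int)) (Nat.digits 10 m))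
        = pvSumO (List.map (fun d : Nat => (d : Int)) (Nat.digits 10 m)) <;>
      simp [heq]
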